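-- pv_equiv track=rewrite | github.com/scriptreiter/table-research | boxer.py | combine_clustered_boxes
-- ===== SOURCE A (Python) =====
-- def combine_clustered_boxes(clusters):
--   new_boxes = []
--
--   for cluster in clusters:
--     min_x = min_y = float('inf')
--     max_x = max_y = float('-inf')
--     labels = []
--
--     # Sort the boxes in the cluster by y and then x
--     # to preserve label ordering
--     cluster.sort(key = lambda x: (x[1], x[0]))
--
--     for box in cluster:
--       min_x = min(min_x, box[0])
--       min_y = min(min_y, box[1])
--       max_x = max(max_x, box[0] + box[2])
--       max_y = max(max_y, box[1] + box[3])
--       labels.append(box[4])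
--
--     # We keep it x, y, width, height, labels for now
--     # Although we later change it to be x1, y1, x2, y2, labels
--     # For now we want to keep this paradigm
--     new_boxes.append((min_x, min_y, max_x - min_x, max_y - min_y, labels))
--
--   return new_boxes
-- ===== SOURCE B (Python) =====
-- def _bbox(boxes, lo, hi):
--   # divide-and-conquer: bounding corners (x1, y1, x2, y2) of boxes[lo:hi], hi > lo
--   if hi - lo == 1:
--     x, y, w, h, _ = boxes[lo]
--     return (x, y, x + w, y + h)
--   mid = (lo + hi) // 2
--   a = _bbox(boxes, lo, mid)
--   b = _bbox(boxes, mid, hi)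
--   return (min(a[0], b[0]), min(a[1], b[1]), max(a[2], b[2]), max(a[3], b[3]))
--
--
-- def _cluster_box(cluster):
--   # keep A's in-place sort so the argument mutation and label order match
--   cluster.sort(key=lambda b: (b[1], b[0]))
--   x1, y1, x2, y2 = _bbox(cluster, 0, len(cluster))
--   return (x1, y1, x2 - x1, y2 - y1, [b[4] for b in cluster])
--
--
-- def combine_clustered_boxes(clusters):
--   return [_cluster_box(cluster) for cluster in clusters]
-- ===== Notes on version B (the rewrite author's own statement) =====
-- stated objective: alternative
-- what changed: B computes each cluster's bounding box by a divide-and-conquer merge of corner rectangles (recursively splitting the sorted cluster at the midpoint and merging the two sub-boxes) instead of A's single fused loop carrying five running accumulators seeded with float infinities; the per-cluster in-place sort is kept.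
-- outside the precondition, e.g. on combine_clustered_boxes([[]]): A returns [(inf, inf, -inf, -inf, [])], B raises RecursionError
import Mathlib
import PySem

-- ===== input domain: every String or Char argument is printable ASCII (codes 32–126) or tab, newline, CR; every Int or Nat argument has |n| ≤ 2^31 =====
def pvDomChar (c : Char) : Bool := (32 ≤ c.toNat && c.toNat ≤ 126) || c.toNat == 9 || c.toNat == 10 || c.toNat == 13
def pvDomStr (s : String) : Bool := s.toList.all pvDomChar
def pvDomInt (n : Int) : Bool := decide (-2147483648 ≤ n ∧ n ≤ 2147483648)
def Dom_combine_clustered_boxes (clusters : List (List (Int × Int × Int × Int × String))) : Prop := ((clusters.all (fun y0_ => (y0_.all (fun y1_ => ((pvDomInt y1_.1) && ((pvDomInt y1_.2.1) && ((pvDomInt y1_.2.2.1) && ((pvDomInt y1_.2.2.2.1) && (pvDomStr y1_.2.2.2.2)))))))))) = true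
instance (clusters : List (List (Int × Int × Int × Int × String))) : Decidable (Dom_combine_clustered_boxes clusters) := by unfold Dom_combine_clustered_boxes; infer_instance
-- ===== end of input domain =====

-- B computes each cluster's bounding box by divide-and-conquer merge of corner rectangles instead
-- of A's fused five-accumulator loop; equivalence is about the return value (both sort each cluster
-- in place in Python). Pre_ excludes inputs with an empty cluster, where A returns float infinities
-- (not ints) and B's recursion raises.


-- ===== PORT A =====
-- A's running min/max start at float('inf')/-inf; for Int we model that seed as `none`
-- (min(inf, v) = v, so the first box replaces it), exact on every nonempty cluster.
def pvMinO (o : Option Int) (v : Int) : Option Int :=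
  match o with
  | none => some v
  | some m => some (min m v)

def pvMaxO (o : Option Int) (v : Int) : Option Int :=
  match o with
  | none => some v
  | some m => some (max m v)

def pvStepA (s : Option Int × Option Int × Option Int × Option Int × List String)
    (b : Int × Int × Int × Int × String) :
    Option Int × Option Int × Option Int × Option Int × List String :=
  (pvMinO s.1 b.1, pvMinO s.2.1 b.2.1,
   pvMaxO s.2.2.1 (b.1 + b.2.2.1), pvMaxO s.2.2.2.1 (b.2.1 + b.2.2.2.1),
   s.2.2.2.2 ++ [b.2.2.2.2])

def combine_clustered_boxes (clusters : List (List (Int × Int × Int × Int × String))) : List (Int × Int × Int × Int × List String) :=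
  clusters.foldl (fun new_boxes cluster =>
    let sc := PySem.List.sorted2 cluster (fun b => b.2.1) (fun b => b.1)
    let st := sc.foldl pvStepA (none, none, none, none, [])
    -- the .getD 0 is unreachable under Pre_ (every cluster nonempty)
    new_boxes ++ [(st.1.getD 0, st.2.1.getD 0, st.2.2.1.getD 0 - st.1.getD 0,
                   st.2.2.2.1.getD 0 - st.2.1.getD 0, st.2.2.2.2)]) []

-- ===== PORT B =====
-- Python's _bbox(boxes, lo, hi) works on the index range [lo, hi); the port carries the
-- corresponding sublist and splits it at its midpoint (mid - lo = length / 2), exactly B's split.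
-- Python diverges on an empty range (excluded by Pre_); the port returns (0,0,0,0) there.
def pvBbox (l : List (Int × Int × Int × Int × String)) : Int × Int × Int × Int :=
  match l with
  | [] => (0, 0, 0, 0)
  | [b] => (b.1, b.2.1, b.1 + b.2.2.1, b.2.1 + b.2.2.2.1)
  | b0 :: b1 :: t =>
    let l' := b0 :: b1 :: t
    let a := pvBbox (l'.take (l'.length / 2))
    let b := pvBbox (l'.drop (l'.length / 2))
    (min a.1 b.1, min a.2.1 b.2.1, max a.2.2.1 b.2.2.1, max a.2.2.2 b.2.2.2)
termination_by l.length
decreasing_by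
  · simp; omega
  · simp; omega

def combine_clustered_boxes_alt (clusters : List (List (Int × Int × Int × Int × String))) : List (Int × Int × Int × Int × List String) :=
  clusters.map (fun cluster =>
    let sc := PySem.List.sorted2 cluster (fun b => b.2.1) (fun b => b.1)
    let bb := pvBbox sc
    (bb.1, bb.2.1, bb.2.2.1 - bb.1, bb.2.2.2 - bb.2.1, sc.map (fun b => b.2.2.2.2)))

-- ===== PRECONDITION & SPEC =====
-- Pre_ excludes inputs containing an empty cluster: on those A returns float infinities
-- (inf, inf, -inf, -inf, []), not values of the declared Int type, and B's recursion raises.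
def Pre_combine_clustered_boxes (clusters : List (List (Int × Int × Int × Int × String))) : Prop :=
  ∀ c ∈ clusters, c ≠ []
instance (clusters : List (List (Int × Int × Int × Int × String))) : Decidable (Pre_combine_clustered_boxes clusters) := by unfold Pre_combine_clustered_boxes; infer_instance

def pvWitness_combine_clustered_boxes : (List (List (Int × Int × Int × Int × String))) :=
  [[(3, 1, 2, 2, "a"), (0, 1, 1, 1, "b"), (5, 0, 1, 1, "c")], [(0, 0, 1, 1, "z")]]

def Spec_combine_clustered_boxes (clusters : List (List (Int × Int × Int × Int × String))) (out : List (Int × Int × Int × Int × List String)) : Prop := out = combine_clustered_boxes_alt clusters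
instance (clusters : List (List (Int × Int × Int × Int × String))) (out : List (Int × Int × Int × Int × List String)) : Decidable (Spec_combine_clustered_boxes clusters out) := by unfold Spec_combine_clustered_boxes; infer_instance

-- ===== CLAIM (what is proved, stated in full; the proofs are below) =====
def Claim_equal_combine_clustered_boxes : Prop := ∀ (clusters : List (List (Int × Int × Int × Int × String))), Dom_combine_clustered_boxes clusters → Pre_combine_clustered_boxes clusters → Spec_combine_clustered_boxes clusters (combine_clustered_boxes clusters)

-- ===== LEMMAS AND PROOFS =====

-- running min/max of a list, seeded by its head (0 on the empty list, never used there)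
def pvMn (l : List Int) : Int := match l with | [] => 0 | h :: t => t.foldl min h
def pvMx (l : List Int) : Int := match l with | [] => 0 | h :: t => t.foldl max h

theorem pv_foldl_min_shift (l : List Int) (a b : Int) :
    l.foldl min (min a b) = min a (l.foldl min b) := by
  induction l generalizing a b with
  | nil => simp
  | cons c l ih => simp only [List.foldl_cons, min_assoc, ih]

theorem pv_foldl_max_shift (l : List Int) (a b : Int) :
    l.foldl max (max a b) = max a (l.foldl max b) := by
  induction l generalizing a b with
  | nil => simp
  | cons c l ih => simp only [List.foldl_cons, max_assoc, ih]

theorem pvMn_append (x y : List Int) (hx : x ≠ []) (hy : y ≠ []) :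
    pvMn (x ++ y) = min (pvMn x) (pvMn y) := by
  match x, y with
  | h :: t, h' :: t' =>
    simp only [pvMn, List.cons_append, List.foldl_append, List.foldl_cons]
    rw [pv_foldl_min_shift]

theorem pvMx_append (x y : List Int) (hx : x ≠ []) (hy : y ≠ []) :
    pvMx (x ++ y) = max (pvMx x) (pvMx y) := by
  match x, y with
  | h :: t, h' :: t' =>
    simp only [pvMx, List.cons_append, List.foldl_append, List.foldl_cons]
    rw [pv_foldl_max_shift]

-- B's divide-and-conquer bbox computes the four running extrema, on every nonempty list.
theorem pvBbox_eq (l : List (Int × Int × Int × Int × String)) (hl : l ≠ []) :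
    pvBbox l = (pvMn (l.map (fun b => b.1)), pvMn (l.map (fun b => b.2.1)),
                pvMx (l.map (fun b => b.1 + b.2.2.1)),
                pvMx (l.map (fun b => b.2.1 + b.2.2.2.1))) := by
  induction hn : l.length using Nat.strong_induction_on generalizing l with
  | _ n ih =>
  match l with
  | [b] => simp [pvBbox, pvMn, pvMx]
  | b0 :: b1 :: t =>
    rw [pvBbox]
    have hlen : (b0 :: b1 :: t).length = n := hn
    set L := b0 :: b1 :: t with hL
    have h2 : 2 ≤ L.length := by simp [hL]
    have htk : (L.take (L.length / 2)).length = L.length / 2 := by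
      simp; omega
    have hdr : (L.drop (L.length / 2)).length = L.length - L.length / 2 := by simp
    have htk_ne : L.take (L.length / 2) ≠ [] := by
      intro h; rw [h] at htk; simp at htk; omega
    have hdr_ne : L.drop (L.length / 2) ≠ [] := by
      intro h; rw [h] at hdr; simp at hdr; omega
    rw [ih _ (by rw [htk]; omega) _ htk_ne rfl,
        ih _ (by rw [hdr]; omega) _ hdr_ne rfl]
    have hsplit : ∀ (f : (Int × Int × Int × Int × String) → Int),
        L.map f = (L.take (L.length / 2)).map f ++ (L.drop (L.length / 2)).map f := by
      intro f; rw [← List.map_append, List.take_append_drop]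
    have mapne : ∀ (x : List (Int × Int × Int × Int × String)) (f : (Int × Int × Int × Int × String) → Int),
        x ≠ [] → x.map f ≠ [] := by intro x f hx; simpa using hx
    refine Prod.ext ?_ (Prod.ext ?_ (Prod.ext ?_ ?_)) <;>
      simp only [hsplit,
        pvMn_append _ _ (mapne _ _ htk_ne) (mapne _ _ hdr_ne),
        pvMx_append _ _ (mapne _ _ htk_ne) (mapne _ _ hdr_ne)]

-- Once every accumulator is `some`, A's fused loop computes the four running folds plus labels.
theorem pvStepA_some (t : List (Int × Int × Int × Int × String))
    (a b c d : Int) (ls : List String) :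
    t.foldl pvStepA (some a, some b, some c, some d, ls) =
      (some (t.foldl (fun m x => min m x.1) a),
       some (t.foldl (fun m x => min m x.2.1) b),
       some (t.foldl (fun m x => max m (x.1 + x.2.2.1)) c),
       some (t.foldl (fun m x => max m (x.2.1 + x.2.2.2.1)) d),
       ls ++ t.map (fun x => x.2.2.2.2)) := by
  induction t generalizing a b c d ls with
  | nil => simp
  | cons h t ih => simp [List.foldl, pvStepA, pvMinO, pvMaxO, ih]

-- A's fold with an append-singleton body is the map of its per-cluster computation.
theorem pv_foldl_append_map {α β : Type} (g : α → β) (l : List α) (acc : List β) :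
    l.foldl (fun a x => a ++ [g x]) acc = acc ++ l.map g := by
  induction l generalizing acc with
  | nil => simp
  | cons h t ih => simp [List.foldl, ih]

-- ===== VERDICT (by name: the statement is the Claim_ definition above) =====
theorem combine_clustered_boxes_spec : Claim_equal_combine_clustered_boxes := by
  intro clusters _ hpre
  unfold Spec_combine_clustered_boxes combine_clustered_boxes combine_clustered_boxes_alt
  rw [pv_foldl_append_map]
  simp only [List.nil_append]
  apply List.map_congr_left
  intro c hc
  have hne : c ≠ [] := hpre c hc
  have hsc : PySem.List.sorted2 c (fun b => b.2.1) (fun b => b.1) ≠ [] := by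
    intro h
    apply hne
    have hp := PySem.List.sorted2_perm c (fun b => b.2.1) (fun b => b.1) (rev := false)
    have := hp.length_eq
    rw [h] at this
    exact List.eq_nil_of_length_eq_zero this.symm
  cases hsc' : PySem.List.sorted2 c (fun b => b.2.1) (fun b => b.1) with
  | nil => exact absurd hsc' hsc
  | cons m t =>
    rw [pvBbox_eq _ (by simp)]
    simp only [List.foldl_cons, pvStepA, pvMinO, pvMaxO, pvStepA_some, List.nil_append,
      Option.getD_some, pvMn, pvMx, List.map_cons, List.foldl_map]
    simp
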